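-- pv_equiv track=rewrite | github.com/anon3465/anon5678 | dinc_ensemble/parameters/utils_decorate_docstring.py | extract_docstr_arguments
-- ===== SOURCE A (Python) =====
-- from typing import Dict
--
-- def extract_docstr_arguments(docstr: str) -> Dict[str, str]:
--     if docstr is None or not isinstance(docstr, str):
--         return {}
--     docstr_lines = docstr.split("\n")
--     # name of the field is always infront of the ":"
--     result = {}
--     argument_indices = [i for i in range(len(docstr_lines)) if ":" in docstr_lines[i]]
--
--     for i, index in enumerate(argument_indices[:]):
--         name = docstr_lines[index].split(":")[0].strip()
--         if i < len(argument_indices)-1: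
--             doc_val = " ".join(docstr_lines[argument_indices[i]+1:argument_indices[i+1]])
--         else:
--             doc_val = " ".join(docstr_lines[argument_indices[i]+1:])
--
--         result[name] = " ".join(doc_val.split())
--     return result
-- ===== SOURCE B (Python) =====
-- def extract_docstr_arguments(docstr):
--     if docstr is None or not isinstance(docstr, str):
--         return {}
--     result = {}
--     name = None
--     buf = []
--     for line in docstr.split("\n"):
--         if ":" in line:
--             if name is not None:
--                 result[name] = " ".join(" ".join(buf).split())
--             name = line.split(":")[0].strip()
--             buf = []
--         else:
--             buf.append(line)
--     if name is not None:
--         result[name] = " ".join(" ".join(buf).split())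
--     return result
-- ===== Notes on version B (the rewrite author's own statement) =====
-- stated objective: simpler
-- what changed: B drops A's precomputed list of header-line indices and the between-index slicing, doing one streaming pass over the lines with a current-name/buffer state that flushes each entry when the next header (or the end) is reached.
import Mathlib
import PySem

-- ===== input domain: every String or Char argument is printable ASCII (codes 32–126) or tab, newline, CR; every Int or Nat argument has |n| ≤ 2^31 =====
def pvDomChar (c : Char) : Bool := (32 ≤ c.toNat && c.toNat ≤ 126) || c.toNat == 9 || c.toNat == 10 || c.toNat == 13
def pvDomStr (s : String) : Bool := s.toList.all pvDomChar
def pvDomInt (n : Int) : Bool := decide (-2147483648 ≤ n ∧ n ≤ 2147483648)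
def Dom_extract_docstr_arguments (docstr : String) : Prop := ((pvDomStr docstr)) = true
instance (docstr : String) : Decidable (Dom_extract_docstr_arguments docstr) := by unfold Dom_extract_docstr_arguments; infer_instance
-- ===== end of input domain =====

-- B replaces A's precomputed header-index list and between-index slicing by a single
-- streaming pass with a current-name/buffer state (simpler decomposition); same return value.

-- ===== PORT A =====
-- literal transliteration of A; line.split(":") is never empty, so Python's [0] is .headD ""
def extract_docstr_arguments (docstr : String) : List (String × String) :=
  let docstr_lines := (PySem.Str.split? docstr "\n").getD []
  let argument_indices : List Int :=
    (PySem.List.pyRange 0 ((docstr_lines.length : Int)) 1).filter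
      (fun i => PySem.Str.isIn ":" (PySem.List.pyGetD docstr_lines i ""))
  let result := (PySem.List.enumerate argument_indices).foldl
    (fun (result : PySem.Dict String String) (p : Int × Int) =>
      let i := p.1
      let index := p.2
      let name := PySem.Str.strip (((PySem.Str.split? (PySem.List.pyGetD docstr_lines index "") ":").getD []).headD "")
      let doc_val :=
        if i < (argument_indices.length : Int) - 1 then
          PySem.Str.join " " (PySem.List.slice docstr_lines (some (PySem.List.pyGetD argument_indices i 0 + 1)) (some (PySem.List.pyGetD argument_indices (i + 1) 0)))
        else
          PySem.Str.join " " (PySem.List.slice docstr_lines (some (PySem.List.pyGetD argument_indices i 0 + 1)) none)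
      result.insert name (PySem.Str.join " " (PySem.Str.split₀ doc_val)))
    PySem.Dict.empty
  result.items

-- ===== PORT B =====
def extract_docstr_arguments_alt (docstr : String) : List (String × String) :=
  let step := fun (st : PySem.Dict String String × Option String × List String) (line : String) =>
    if PySem.Str.isIn ":" line then
      let result := match st.2.1 with
        | some n => st.1.insert n (PySem.Str.join " " (PySem.Str.split₀ (PySem.Str.join " " st.2.2)))
        | none => st.1
      (result, some (PySem.Str.strip (((PySem.Str.split? line ":").getD []).headD "")), ([] : List String))
    else (st.1, st.2.1, st.2.2 ++ [line])
  let fin := ((PySem.Str.split? docstr "\n").getD []).foldl step (PySem.Dict.empty, none, [])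
  match fin.2.1 with
  | some n => (fin.1.insert n (PySem.Str.join " " (PySem.Str.split₀ (PySem.Str.join " " fin.2.2)))).items
  | none => fin.1.items

-- ===== PRECONDITION & SPEC =====
def Spec_extract_docstr_arguments (docstr : String) (out : List (String × String)) : Prop := out = extract_docstr_arguments_alt docstr
instance (docstr : String) (out : List (String × String)) : Decidable (Spec_extract_docstr_arguments docstr out) := by unfold Spec_extract_docstr_arguments; infer_instance

-- ===== CLAIM (what is proved, stated in full; the proofs are below) =====
def Claim_equal_extract_docstr_arguments : Prop := ∀ (docstr : String), Dom_extract_docstr_arguments docstr → Spec_extract_docstr_arguments docstr (extract_docstr_arguments docstr)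

-- ===== LEMMAS AND PROOFS =====

-- proof-only helpers: a common functional description of both programs
def pvP (l : String) : Bool := PySem.Str.isIn ":" l
def pvKey (l : String) : String := PySem.Str.strip (((PySem.Str.split? l ":").getD []).headD "")
def pvNorm (seg : List String) : String := PySem.Str.join " " (PySem.Str.split₀ (PySem.Str.join " " seg))
def pvIns (d : PySem.Dict String String) (e : String × String) : PySem.Dict String String := d.insert e.1 e.2

/-- positions (as Nat) of the lines containing ':' -/
def hdrN : List String → List Nat
  | [] => []
  | l :: ls => if pvP l then 0 :: (hdrN ls).map (· + 1) else (hdrN ls).map (· + 1)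

/-- the (name, normalized doc) entry for a header at position `a` with next boundary `b` -/
def pvGN (lines : List String) (a b : Nat) : String × String :=
  (pvKey (lines.getD a ""), pvNorm ((lines.drop (a + 1)).take (b - (a + 1))))

/-- A's entry list, in zip-with-next-boundary form -/
def pvZ (lines : List String) : List (String × String) :=
  ((hdrN lines).zip ((hdrN lines).drop 1 ++ [lines.length])).map (fun p => pvGN lines p.1 p.2)

/-- A's per-header entry as a function of the enumerate pair -/
def pvF (lines : List String) (p : Int × Int) : String × String :=
  (pvKey (PySem.List.pyGetD lines p.2 ""),
   PySem.Str.join " " (PySem.Str.split₀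
     (if p.1 < ((((hdrN lines).map (fun n : Nat => (n : Int))).length : Int) - 1) then
        PySem.Str.join " " (PySem.List.slice lines
          (some (PySem.List.pyGetD ((hdrN lines).map (fun n : Nat => (n : Int))) p.1 0 + 1))
          (some (PySem.List.pyGetD ((hdrN lines).map (fun n : Nat => (n : Int))) (p.1 + 1) 0)))
      else
        PySem.Str.join " " (PySem.List.slice lines
          (some (PySem.List.pyGetD ((hdrN lines).map (fun n : Nat => (n : Int))) p.1 0 + 1))
          none))))

/-- B's streaming emitter: state = current (name, buffer) if a header was already seen -/
def pvRun : Option (String × List String) → List String → List (String × String)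
  | none, [] => []
  | some (n, buf), [] => [(n, pvNorm buf)]
  | none, l :: ls => if pvP l then pvRun (some (pvKey l, [])) ls else pvRun none ls
  | some (n, buf), l :: ls =>
      if pvP l then (n, pvNorm buf) :: pvRun (some (pvKey l, [])) ls
      else pvRun (some (n, buf ++ [l])) ls

/-- B's loop body, as in the port -/
def pvStep (st : PySem.Dict String String × Option String × List String) (line : String) :
    PySem.Dict String String × Option String × List String :=
  if PySem.Str.isIn ":" line then
    let result := match st.2.1 with
      | some n => st.1.insert n (PySem.Str.join " " (PySem.Str.split₀ (PySem.Str.join " " st.2.2)))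
      | none => st.1
    (result, some (PySem.Str.strip (((PySem.Str.split? line ":").getD []).headD "")), ([] : List String))
  else (st.1, st.2.1, st.2.2 ++ [line])

/-- B's final flush -/
def pvFin (st : PySem.Dict String String × Option String × List String) : PySem.Dict String String :=
  match st.2.1 with
  | some n => st.1.insert n (pvNorm st.2.2)
  | none => st.1

lemma pyRange_shift (b : Int) :
    PySem.List.pyRange 1 (b + 1) 1 = (PySem.List.pyRange 0 b 1).map (· + 1) := by
  rw [PySem.List.pyRange_one, PySem.List.pyRange_one]
  simp [List.map_map, Function.comp]
  intro a _
  omega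

lemma castShift (H : List Nat) :
    (H.map (· + 1)).map (fun n : Nat => (n : Int)) = (H.map (fun n : Nat => (n : Int))).map (· + 1) := by
  rw [List.map_map, List.map_map]
  apply List.map_congr_left
  intro a _
  simp only [Function.comp_apply]
  push_cast
  ring

lemma hdrIdx_eq (lines : List String) :
    (PySem.List.pyRange 0 ((lines.length : Int)) 1).filter
      (fun i => PySem.Str.isIn ":" (PySem.List.pyGetD lines i ""))
    = (hdrN lines).map (fun n : Nat => (n : Int)) := by
  induction lines with
  | nil => simp [PySem.List.pyRange_one_eq_nil, hdrN]
  | cons l ls ih =>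
    have h0 : ((l :: ls).length : Int) = (ls.length : Int) + 1 := by push_cast [List.length_cons]; ring
    rw [h0, PySem.List.pyRange_one_cons (by positivity),
        show ((0:Int) + 1) = 1 from rfl, pyRange_shift]
    rw [List.filter_cons, List.filter_map]
    have hc : ∀ x ∈ PySem.List.pyRange 0 ((ls.length : Int)) 1,
        ((fun i => PySem.Str.isIn ":" (PySem.List.pyGetD (l :: ls) i "")) ∘ (· + 1)) x
        = (fun i => PySem.Str.isIn ":" (PySem.List.pyGetD ls i "")) x := by
      intro x hx
      rw [PySem.List.mem_pyRange_one] at hx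
      obtain ⟨k, rfl⟩ := Int.eq_ofNat_of_zero_le hx.1
      simp only [Function.comp_apply]
      have h1 : ((k : Int) + 1) = ((k + 1 : Nat) : Int) := by push_cast; ring
      rw [h1, PySem.List.pyGetD_natCast, PySem.List.pyGetD_natCast, List.getD_cons_succ]
    rw [List.filter_congr hc, ih]
    have hg : PySem.Str.isIn ":" (PySem.List.pyGetD (l :: ls) (0:Int) "") = pvP l := by
      simp [PySem.List.pyGetD, pvP]
    by_cases hp : pvP l
    · simp only [hdrN, hp, if_pos, hg, List.map_cons, castShift]
      rfl
    · simp only [hdrN, hp, hg, if_false, Bool.false_eq_true, castShift]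

lemma lemA (ls : List String) (h : hdrN ls = []) : ls.takeWhile (fun x => !pvP x) = ls := by
  induction ls with
  | nil => rfl
  | cons l ls ih =>
    by_cases hp : pvP l
    · simp [hdrN, hp] at h
    · simp [hdrN, hp] at h
      simp [hp, ih h]

lemma lemB (ls : List String) : ∀ (j0 : Nat) (rest : List Nat), hdrN ls = j0 :: rest →
    ls.take j0 = ls.takeWhile (fun x => !pvP x) := by
  induction ls with
  | nil => intro j0 rest h; simp [hdrN] at h
  | cons l ls ih =>
    intro j0 rest h
    by_cases hp : pvP l
    · simp [hdrN, hp] at h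
      simp [h.1.symm, hp]
    · simp [hdrN, hp] at h
      cases hls : hdrN ls with
      | nil => rw [hls] at h; simp at h
      | cons k r =>
        rw [hls] at h; simp at h
        obtain ⟨hj, -⟩ := h
        rw [← hj]
        simp [hp, ih k r hls]

lemma gNshift (l : String) (ls : List String) (a b : Nat) :
    pvGN (l :: ls) (a + 1) (b + 1) = pvGN ls a b := by
  have h : b + 1 - (a + 1 + 1) = b - (a + 1) := by omega
  simp [pvGN, h]

lemma zipShift (H : List Nat) (l : String) (ls : List String) :
    (((H.map (· + 1)).zip ((H.map (· + 1)).drop 1 ++ [ls.length + 1])).map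
      (fun p => pvGN (l :: ls) p.1 p.2))
    = (H.zip (H.drop 1 ++ [ls.length])).map (fun p => pvGN ls p.1 p.2) := by
  have h1 : ([ls.length + 1] : List Nat) = ([ls.length] : List Nat).map (· + 1) := rfl
  rw [h1, ← List.map_drop, ← List.map_append, List.zip_map, List.map_map]
  apply List.map_congr_left
  intro p _
  exact gNshift l ls p.1 p.2

lemma E (lines : List String) :
    (PySem.List.enumerate ((hdrN lines).map (fun n : Nat => (n : Int)))).map (pvF lines)
    = pvZ lines := by
  apply List.ext_getElem
  · simp [pvZ, PySem.List.length_enumerate]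
    omega
  · intro k h1 h2
    have hk' : k < (hdrN lines).length := by
      simpa [PySem.List.length_enumerate] using h1
    have hJlen : ((hdrN lines).map (fun n : Nat => (n : Int))).length = (hdrN lines).length :=
      List.length_map ..
    simp only [List.getElem_map, PySem.List.getElem_enumerate]
    rw [show ((0 : Int) + (k : Int)) = ((k : Nat) : Int) from by ring]
    unfold pvF
    dsimp only
    rw [show (pvZ lines)[k] = pvGN lines (hdrN lines)[k]
          (((hdrN lines).drop 1 ++ [lines.length])[k]'(by
            simp only [List.length_append, List.length_drop, List.length_cons, List.length_nil]
            omega)) from by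
      simp only [pvZ, List.getElem_map, List.getElem_zip]]
    have hget : PySem.List.pyGetD ((hdrN lines).map (fun n : Nat => (n : Int))) ((k : Nat) : Int) 0
        = (((hdrN lines)[k] : Nat) : Int) := by
      rw [PySem.List.pyGetD_natCast, List.getD_eq_getElem _ _ (by simpa using hk'), List.getElem_map]
    by_cases hk1 : k + 1 < (hdrN lines).length
    · have hc : (((k : Nat) : Int)) < ((((hdrN lines).map (fun n : Nat => (n : Int))).length : Int) - 1) := by
        rw [hJlen]; omega
      rw [if_pos hc]
      have hget1 : PySem.List.pyGetD ((hdrN lines).map (fun n : Nat => (n : Int))) (((k : Nat) : Int) + 1) 0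
          = (((hdrN lines)[k + 1] : Nat) : Int) := by
        rw [show (((k : Nat) : Int) + 1) = (((k + 1 : Nat)) : Int) from by push_cast; ring,
          PySem.List.pyGetD_natCast, List.getD_eq_getElem _ _ (by simpa using hk1), List.getElem_map]
      rw [hget, hget1]
      rw [show ((((hdrN lines)[k] : Nat) : Int) + 1) = (((hdrN lines)[k] + 1 : Nat) : Int) from by
        push_cast; ring]
      rw [PySem.List.slice_natCast, PySem.List.pyGetD_natCast]
      have hb : ((hdrN lines).drop 1 ++ [lines.length])[k]'(by
          simp only [List.length_append, List.length_drop, List.length_cons, List.length_nil]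
          omega) = (hdrN lines)[k + 1] := by
        rw [List.getElem_append_left (by simp only [List.length_drop]; omega : k < ((hdrN lines).drop 1).length)]
        rw [List.getElem_drop]
        congr 1
        omega
      rw [hb]
      simp only [pvGN, pvNorm]
    · have hc : ¬ ((((k : Nat) : Int)) < ((((hdrN lines).map (fun n : Nat => (n : Int))).length : Int) - 1)) := by
        rw [hJlen]; omega
      rw [if_neg hc]
      rw [hget]
      rw [show ((((hdrN lines)[k] : Nat) : Int) + 1) = (((hdrN lines)[k] + 1 : Nat) : Int) from by
        push_cast; ring]
      rw [PySem.List.slice_from_natCast, PySem.List.pyGetD_natCast]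
      have hb : ((hdrN lines).drop 1 ++ [lines.length])[k]'(by
          simp only [List.length_append, List.length_drop, List.length_cons, List.length_nil]
          omega) = lines.length := by
        rw [List.getElem_append_right (by simp; omega)]
        simp
      rw [hb]
      have htk : (lines.drop ((hdrN lines)[k] + 1)).take (lines.length - ((hdrN lines)[k] + 1))
          = lines.drop ((hdrN lines)[k] + 1) := by
        apply List.take_of_length_le
        simp
      simp only [pvGN, pvNorm, htk]

lemma pvRun_some (n : String) (ls : List String) :
    ∀ buf, pvRun (some (n, buf)) ls
      = (n, pvNorm (buf ++ ls.takeWhile (fun x => !pvP x))) :: pvRun none ls := by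
  induction ls with
  | nil => intro buf; simp [pvRun]
  | cons l ls ih =>
    intro buf
    by_cases h : pvP l
    · simp [pvRun, h]
    · simp [pvRun, h, ih (buf ++ [l])]

lemma M (lines : List String) : pvZ lines = pvRun none lines := by
  induction lines with
  | nil => rfl
  | cons l ls ih =>
    by_cases h : pvP l
    · cases hH : hdrN ls with
      | nil =>
        have tw := lemA ls hH
        have hz : pvRun none ls = [] := by rw [← ih]; simp only [pvZ, hH]; rfl
        have hr : pvRun none (l :: ls) = pvRun (some (pvKey l, [])) ls := by
          simp only [pvRun, h, if_true]
        rw [hr, pvRun_some, tw, hz]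
        have hL : pvZ (l :: ls) = [pvGN (l :: ls) 0 (ls.length + 1)] := by
          simp only [pvZ, hdrN, h, if_true, hH, List.map_nil, List.drop_succ_cons,
            List.drop_nil, List.nil_append, List.zip_cons_cons, List.zip_nil_left,
            List.map_cons, List.map_nil, List.length_cons]
        rw [hL]
        simp only [pvGN, List.getD_cons_zero, List.drop_succ_cons, List.drop_zero,
          Nat.add_sub_cancel, List.take_length, List.nil_append]
      | cons j0 rest =>
        have tw := lemB ls j0 rest hH
        have hr : pvRun none (l :: ls) = pvRun (some (pvKey l, [])) ls := by
          simp only [pvRun, h, if_true]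
        rw [hr, pvRun_some, ← tw, ← ih]
        have hhd : hdrN (l :: ls) = 0 :: (j0 + 1) :: rest.map (· + 1) := by
          simp only [hdrN, h, if_true, hH, List.map_cons]
        have hL : pvZ (l :: ls)
            = pvGN (l :: ls) 0 (j0 + 1)
              :: (((j0 :: rest).map (· + 1)).zip (((j0 :: rest).map (· + 1)).drop 1
                    ++ [ls.length + 1])).map (fun p => pvGN (l :: ls) p.1 p.2) := by
          simp only [pvZ, hhd, List.length_cons, List.map_cons, List.drop_succ_cons,
            List.drop_zero, List.cons_append, List.zip_cons_cons]
        have hfst : pvGN (l :: ls) 0 (j0 + 1) = (pvKey l, pvNorm ([] ++ ls.take j0)) := by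
          simp only [pvGN, List.getD_cons_zero, List.drop_succ_cons, List.drop_zero,
            Nat.add_sub_cancel, List.nil_append]
        rw [hL, hfst, zipShift (j0 :: rest) l ls, ← hH]
        rfl
    · have hr : pvRun none (l :: ls) = pvRun none ls := by
        simp only [pvRun, h, Bool.false_eq_true, if_false]
      rw [hr, ← ih]
      have hhd : hdrN (l :: ls) = (hdrN ls).map (· + 1) := by
        simp only [hdrN, h, Bool.false_eq_true, if_false]
      calc pvZ (l :: ls)
          = (((hdrN ls).map (· + 1)).zip (((hdrN ls).map (· + 1)).drop 1
              ++ [ls.length + 1])).map (fun p => pvGN (l :: ls) p.1 p.2) := by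
            simp only [pvZ, hhd, List.length_cons]
        _ = pvZ ls := zipShift (hdrN ls) l ls

lemma BL2 (ls : List String) :
    ∀ (d : PySem.Dict String String) (nm : String) (buf : List String),
      pvFin (ls.foldl pvStep (d, some nm, buf)) = (pvRun (some (nm, buf)) ls).foldl pvIns d := by
  induction ls with
  | nil => intro d nm buf; simp [pvFin, pvRun, pvIns]
  | cons l ls ih =>
    intro d nm buf
    rw [List.foldl_cons]
    by_cases h : pvP l
    · have hS : PySem.Str.isIn ":" l = true := h
      have hstep : pvStep (d, some nm, buf) l = (d.insert nm (pvNorm buf), some (pvKey l), []) := by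
        simp only [pvStep, hS, if_true]
        rfl
      have hrun : pvRun (some (nm, buf)) (l :: ls)
          = (nm, pvNorm buf) :: pvRun (some (pvKey l, [])) ls := by
        simp only [pvRun, h, if_true]
      rw [hstep, hrun, List.foldl_cons, ih]
      rfl
    · have hP : pvP l = false := by
        cases hq : pvP l
        · rfl
        · exact absurd hq h
      have hS : PySem.Str.isIn ":" l = false := hP
      have hstep : pvStep (d, some nm, buf) l = (d, some nm, buf ++ [l]) := by
        simp only [pvStep, hS, Bool.false_eq_true, if_false]
      have hrun : pvRun (some (nm, buf)) (l :: ls) = pvRun (some (nm, buf ++ [l])) ls := by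
        simp only [pvRun, hP, Bool.false_eq_true, if_false]
      rw [hstep, hrun, ih]

lemma BL1 (ls : List String) :
    ∀ (d : PySem.Dict String String) (buf : List String),
      pvFin (ls.foldl pvStep (d, none, buf)) = (pvRun none ls).foldl pvIns d := by
  induction ls with
  | nil => intro d buf; rfl
  | cons l ls ih =>
    intro d buf
    rw [List.foldl_cons]
    by_cases h : pvP l
    · have hS : PySem.Str.isIn ":" l = true := h
      have hstep : pvStep (d, none, buf) l = (d, some (pvKey l), []) := by
        simp only [pvStep, hS, if_true]
        rfl
      have hrun : pvRun none (l :: ls) = pvRun (some (pvKey l, [])) ls := by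
        simp only [pvRun, h, if_true]
      rw [hstep, hrun]
      exact BL2 ls d (pvKey l) []
    · have hP : pvP l = false := by
        cases hq : pvP l
        · rfl
        · exact absurd hq h
      have hS : PySem.Str.isIn ":" l = false := hP
      have hstep : pvStep (d, none, buf) l = (d, none, buf ++ [l]) := by
        simp only [pvStep, hS, Bool.false_eq_true, if_false]
      have hrun : pvRun none (l :: ls) = pvRun none ls := by
        simp only [pvRun, hP, Bool.false_eq_true, if_false]
      rw [hstep, hrun, ih]

lemma bridge (lines : List String) :
    ((PySem.List.enumerate
        ((PySem.List.pyRange 0 ((lines.length : Int)) 1).filter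
          (fun i => PySem.Str.isIn ":" (PySem.List.pyGetD lines i "")))).foldl
      (fun (result : PySem.Dict String String) (p : Int × Int) =>
        result.insert
          (PySem.Str.strip (((PySem.Str.split? (PySem.List.pyGetD lines p.2 "") ":").getD []).headD ""))
          (PySem.Str.join " " (PySem.Str.split₀
            (if p.1 < ((((PySem.List.pyRange 0 ((lines.length : Int)) 1).filter
                  (fun i => PySem.Str.isIn ":" (PySem.List.pyGetD lines i ""))).length : Int) - 1) then
               PySem.Str.join " " (PySem.List.slice lines
                 (some (PySem.List.pyGetD ((PySem.List.pyRange 0 ((lines.length : Int)) 1).filter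
                    (fun i => PySem.Str.isIn ":" (PySem.List.pyGetD lines i ""))) p.1 0 + 1))
                 (some (PySem.List.pyGetD ((PySem.List.pyRange 0 ((lines.length : Int)) 1).filter
                    (fun i => PySem.Str.isIn ":" (PySem.List.pyGetD lines i ""))) (p.1 + 1) 0)))
             else
               PySem.Str.join " " (PySem.List.slice lines
                 (some (PySem.List.pyGetD ((PySem.List.pyRange 0 ((lines.length : Int)) 1).filter
                    (fun i => PySem.Str.isIn ":" (PySem.List.pyGetD lines i ""))) p.1 0 + 1))
                 none)))))
      PySem.Dict.empty).items
    = (pvFin (lines.foldl pvStep (PySem.Dict.empty, none, []))).items := by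
  rw [BL1 lines PySem.Dict.empty [], hdrIdx_eq lines, ← M lines, ← E lines]
  rw [List.foldl_map]
  rfl

lemma finItems (st : PySem.Dict String String × Option String × List String) :
    (match st.2.1 with
      | some n => (st.1.insert n (PySem.Str.join " " (PySem.Str.split₀ (PySem.Str.join " " st.2.2)))).items
      | none => st.1.items)
    = (pvFin st).items := by
  obtain ⟨d, o, b⟩ := st
  cases o <;> rfl

-- ===== VERDICT (by name: the statement is the Claim_ definition above) =====
theorem extract_docstr_arguments_spec : Claim_equal_extract_docstr_arguments := by
  intro docstr _
  unfold Spec_extract_docstr_arguments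
  show extract_docstr_arguments docstr = extract_docstr_arguments_alt docstr
  have h2 : extract_docstr_arguments_alt docstr
      = (pvFin (((PySem.Str.split? docstr "\n").getD []).foldl pvStep (PySem.Dict.empty, none, []))).items :=
    finItems _
  exact (bridge ((PySem.Str.split? docstr "\n").getD [])).trans h2.symm
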